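-- pv_equiv track=rewrite | github.com/irenezhengg/111-1-Programming | Week 4/013.py | calculate
-- ===== SOURCE A (Python) =====
-- def calculate(m,n,a,b):
--     sum = 0
--     for i in range (m, n+1, a):
--         sum += i
--     multi = 1
--     for i in range (m, n+1, b):
--         multi *= i
--     return sum,multi
-- ===== SOURCE B (Python) =====
-- def calculate(m, n, a, b):
--     t = n + 1
--     ka = max(0, -((m - t) // a))           # number of terms of range(m, t, a)
--     s = ka * m + a * ka * (ka - 1) // 2    # closed-form arithmetic series (exact: ka*(ka-1) is even)
--     kb = max(0, -((m - t) // b))           # number of terms of range(m, t, b)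
--     multi = 1
--     x = m
--     for _ in range(kb):
--         multi *= x
--         x += b
--     return s, multi
-- ===== Notes on version B (the rewrite author's own statement) =====
-- stated objective: alternative
-- what changed: B computes each range's term count by a floor-division formula, replaces the sum loop with the closed-form arithmetic-series value ka*m + a*ka*(ka-1)//2, and computes the product with a counted loop that steps a cursor variable instead of iterating a range of values.
import Mathlib
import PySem

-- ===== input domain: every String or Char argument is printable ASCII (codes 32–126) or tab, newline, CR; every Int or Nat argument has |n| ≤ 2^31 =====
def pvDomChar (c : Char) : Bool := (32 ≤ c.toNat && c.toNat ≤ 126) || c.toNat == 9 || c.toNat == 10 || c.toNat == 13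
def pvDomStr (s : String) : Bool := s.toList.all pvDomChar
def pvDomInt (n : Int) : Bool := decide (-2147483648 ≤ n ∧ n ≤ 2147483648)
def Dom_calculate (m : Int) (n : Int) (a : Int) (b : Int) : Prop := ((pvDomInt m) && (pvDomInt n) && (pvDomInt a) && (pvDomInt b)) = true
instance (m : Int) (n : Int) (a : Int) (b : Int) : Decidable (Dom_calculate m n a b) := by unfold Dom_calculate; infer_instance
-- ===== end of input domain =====

-- B computes each range's term count by a floor-division formula, gets the sum in closed form
-- (arithmetic series) and the product by a counted loop stepping a cursor, instead of iterating range objects.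
-- ===== PORT A =====
def calculate (m : Int) (n : Int) (a : Int) (b : Int) : Int × Int :=
  let sum := (PySem.List.pyRange m (n + 1) a).foldl (fun acc i => acc + i) 0
  let multi := (PySem.List.pyRange m (n + 1) b).foldl (fun acc i => acc * i) 1
  (sum, multi)

-- ===== PORT B =====
-- counted product loop: multiplies acc by x, advances x by s, k times (Source B's `for _ in range(kb)` loop)
def prodLoop : Nat → Int → Int → Int → Int
  | 0, _, _, acc => acc
  | k+1, x, s, acc => prodLoop k (x + s) s (acc * x)

def calculate_alt (m : Int) (n : Int) (a : Int) (b : Int) : Int × Int :=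
  let t := n + 1
  let ka : Int := max 0 (-(PySem.Int.floordiv (m - t) a))
  let s : Int := ka * m + PySem.Int.floordiv (a * ka * (ka - 1)) 2
  let kb : Int := max 0 (-(PySem.Int.floordiv (m - t) b))
  (s, prodLoop kb.toNat m b 1)

-- ===== PRECONDITION & SPEC =====
-- Python's range raises ValueError when the step is 0: exactly a ≠ 0 ∧ b ≠ 0 is admitted.
def Pre_calculate (m : Int) (n : Int) (a : Int) (b : Int) : Prop := a ≠ 0 ∧ b ≠ 0
instance (m : Int) (n : Int) (a : Int) (b : Int) : Decidable (Pre_calculate m n a b) := by unfold Pre_calculate; infer_instance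
def pvWitness_calculate : Int × Int × Int × Int := (1, 10, 2, 3)

def Spec_calculate (m : Int) (n : Int) (a : Int) (b : Int) (out : Int × Int) : Prop := out = calculate_alt m n a b
instance (m : Int) (n : Int) (a : Int) (b : Int) (out : Int × Int) : Decidable (Spec_calculate m n a b out) := by unfold Spec_calculate; infer_instance

-- ===== CLAIM =====
def Claim_equal_calculate : Prop := ∀ (m : Int) (n : Int) (a : Int) (b : Int), Dom_calculate m n a b → Pre_calculate m n a b → Spec_calculate m n a b (calculate m n a b)

-- ===== LEMMAS AND PROOFS =====

-- ceiling division for a positive divisor, as Python floor division computes it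
theorem ceil_div_eq (d s : Int) (hs : 0 < s) : (d + s - 1) / s = -((-d) / s) := by
  have hsne : s ≠ 0 := ne_of_gt hs
  have hd : s * (d / s) + d % s = d := Int.mul_ediv_add_emod d s
  have hr0 : 0 ≤ d % s := Int.emod_nonneg d hsne
  have hr1 : d % s < s := Int.emod_lt_of_pos d hs
  set q := d / s with hq
  set r := d % s with hrdef
  by_cases h : r = 0
  · have h1 : d + s - 1 = (s - 1) + s * q := by omega
    have h2 : -d = 0 + s * (-q) := by rw [mul_neg]; omega
    rw [h1, h2, Int.add_mul_ediv_left _ _ hsne, Int.add_mul_ediv_left _ _ hsne,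
        Int.ediv_eq_zero_of_lt (by omega) (by omega), Int.ediv_eq_zero_of_lt le_rfl hs]
    ring
  · have h1 : d + s - 1 = (r - 1) + s * (q + 1) := by rw [mul_add, mul_one]; omega
    have h2 : -d = (s - r) + s * (-q - 1) := by rw [mul_sub, mul_neg, mul_one]; omega
    rw [h1, h2, Int.add_mul_ediv_left _ _ hsne, Int.add_mul_ediv_left _ _ hsne,
        Int.ediv_eq_zero_of_lt (by omega) (by omega),
        Int.ediv_eq_zero_of_lt (by omega) (by omega)]
    ring

-- Python floor division by a negative divisor, reduced to Euclidean division
theorem fdiv_neg_divisor (x u : Int) (hu : 0 < u) : Int.fdiv x (-u) = (-x) / u := by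
  have hne : u ≠ 0 := ne_of_gt hu
  rw [Int.fdiv_neg hne, Int.neg_ediv]
  by_cases h : u ∣ x
  · simp [h, Int.fdiv_eq_ediv, Int.le_of_lt hu]
  · have hsign : u.sign = 1 := Int.sign_eq_one_of_pos hu
    simp [h, Int.fdiv_eq_ediv, Int.le_of_lt hu, hsign]

theorem one_le_ediv (x u : Int) (hu : 0 < u) (hx : u ≤ x) : 1 ≤ x / u :=
  (Int.le_ediv_iff_mul_le hu).mpr (by omega)

-- the term count of range(m, t, s) for s ≠ 0, as B's floor-division formula computes it
theorem pyRange_count (m t s : Int) (hs : s ≠ 0) :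
    PySem.List.pyRange m t s =
      (List.range (max 0 (-(PySem.Int.floordiv (m - t) s))).toNat).map (fun (k : Nat) => m + s * (k : Int)) := by
  unfold PySem.List.pyRange PySem.Int.floordiv
  rw [if_neg hs]
  rcases lt_or_gt_of_ne hs with hneg | hpos
  · rw [if_neg (by omega)]
    have hfd : Int.fdiv (m - t) s = (-(m - t)) / (-s) := by
      have := fdiv_neg_divisor (m - t) (-s) (by omega)
      rwa [neg_neg] at this
    by_cases hlt : t < m
    · rw [if_pos hlt]
      have hceil : (m - t + -s - 1) / (-s) = -((-(m - t)) / (-s)) := ceil_div_eq (m - t) (-s) (by omega)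
      have hone : 1 ≤ (m - t + -s - 1) / (-s) := one_le_ediv _ _ (by omega) (by omega)
      have hcnt : ((m - t + -s - 1) / (-s)).toNat = (max 0 (-Int.fdiv (m - t) s)).toNat := by
        rw [hfd]; omega
      rw [hcnt]
    · rw [if_neg hlt]
      have h0 : 0 ≤ (-(m - t)) / (-s) := Int.ediv_nonneg (by omega) (by omega)
      have hcnt : (max 0 (-Int.fdiv (m - t) s)).toNat = 0 := by rw [hfd]; omega
      rw [hcnt]
  · rw [if_pos hpos]
    have hfd : Int.fdiv (m - t) s = (m - t) / s := by
      rw [Int.fdiv_eq_ediv]; simp [Int.le_of_lt hpos]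
    by_cases hlt : m < t
    · rw [if_pos hlt]
      have hceil : (t - m + s - 1) / s = -((-(t - m)) / s) := ceil_div_eq (t - m) s hpos
      have hone : 1 ≤ (t - m + s - 1) / s := one_le_ediv _ _ hpos (by omega)
      have hcnt : ((t - m + s - 1) / s).toNat = (max 0 (-Int.fdiv (m - t) s)).toNat := by
        rw [hfd]
        have hmt : m - t = -(t - m) := by ring
        rw [hmt]
        omega
      rw [hcnt]
    · rw [if_neg hlt]
      have h0 : 0 ≤ (m - t) / s := Int.ediv_nonneg (by omega) (by omega)
      have hcnt : (max 0 (-Int.fdiv (m - t) s)).toNat = 0 := by rw [hfd]; omega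
      rw [hcnt]

-- twice the folded sum of an arithmetic progression, in closed form
theorem two_mul_foldl_sum (start step : Int) (c : Nat) :
    2 * ((List.range c).map (fun (k : Nat) => start + step * (k : Int))).foldl (fun acc i => acc + i) 0
      = 2 * (c : Int) * start + step * ((c : Int) * ((c : Int) - 1)) := by
  induction c with
  | zero => simp
  | succ c ih =>
    rw [List.range_succ, List.map_append, List.foldl_append]
    simp only [List.map_cons, List.map_nil, List.foldl_cons, List.foldl_nil]
    push_cast
    push_cast at ih
    linear_combination ih

theorem floordiv_two_of_even (x : Int) (h : 2 ∣ x) : PySem.Int.floordiv x 2 = x / 2 := by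
  unfold PySem.Int.floordiv
  rw [Int.fdiv_eq_ediv_of_dvd h]

theorem two_dvd_mul_pred (k : Int) : 2 ∣ k * (k - 1) := by
  rcases Int.even_or_odd k with ⟨j, hj⟩ | ⟨j, hj⟩
  · exact ⟨j * (k - 1), by rw [hj]; ring⟩
  · exact ⟨k * j, by rw [hj]; ring⟩

-- A's product fold over an arithmetic progression equals B's counted loop
theorem foldl_mul_eq_prodLoop (c : Nat) : ∀ (x s acc : Int),
    ((List.range c).map (fun (k : Nat) => x + s * (k : Int))).foldl (fun a i => a * i) acc
      = prodLoop c x s acc := by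
  induction c with
  | zero => intro x s acc; rfl
  | succ c ih =>
    intro x s acc
    rw [List.range_succ_eq_map]
    simp only [List.map_cons, List.foldl_cons, List.map_map]
    have hf : ((fun (k : Nat) => x + s * (k : Int)) ∘ (fun (i : Nat) => i + 1))
        = (fun (k : Nat) => (x + s) + s * (k : Int)) := by
      funext k; simp only [Function.comp]; push_cast; ring
    rw [hf]
    simp only [Nat.cast_zero, mul_zero, add_zero]
    exact ih (x + s) s (acc * x)

-- ===== VERDICT =====
theorem calculate_spec : Claim_equal_calculate := by
  intro m n a b _ hpre
  unfold Spec_calculate calculate calculate_alt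
  simp only [Prod.mk.injEq]
  constructor
  · -- sum component
    rw [pyRange_count m (n + 1) a hpre.1]
    set ka : Int := max 0 (-(PySem.Int.floordiv (m - (n + 1)) a)) with hka
    set c : Nat := ka.toNat with hc
    have hka0 : 0 ≤ ka := le_max_left 0 _
    have hcast : (c : Int) = ka := Int.toNat_of_nonneg hka0
    have hsum := two_mul_foldl_sum m a c
    obtain ⟨j, hj⟩ : (2 : Int) ∣ (ka : Int) * (ka - 1) := two_dvd_mul_pred ka
    have hd : a * ka * (ka - 1) = 2 * (a * j) := by rw [mul_assoc, hj]; ring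
    rw [hd, floordiv_two_of_even _ ⟨a * j, rfl⟩, Int.mul_ediv_cancel_left _ (by norm_num)]
    rw [hcast] at hsum
    rw [mul_assoc, hj] at hsum
    linarith
  · -- product component
    rw [pyRange_count m (n + 1) b hpre.2]
    exact foldl_mul_eq_prodLoop _ m b 1
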